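-- pv_equiv track=rewrite | github.com/Herasium/2025_2026_nsi_lnd_term4_2_2 | modules/simulation/integration.py | gate_compute_outputs
-- ===== SOURCE A (Python) =====
-- from typing import List, Tuple, Any
--
-- def gate_compute_outputs(name: str, inputs: List[bool]) -> List[bool]:
--     """
--     Calcule les sorties d'une porte selon son nom.
--     Retourne une liste de bools (1 valeur par sortie).
--     Nom lumineux : AND, OR, NOT, XOR, NAND, NOR, XNOR
--     """
--     n = (name or "AND").strip().upper()
--     vals = [bool(v) for v in inputs]
--
--     if n == "AND":
--         return [all(vals)]
--     if n == "OR":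
--         return [any(vals)]
--     if n == "NOT":
--         return [not vals[0]] if vals else [True]
--     if n == "XOR":
--         return [sum(1 for v in vals if v) % 2 == 1]
--     if n == "NAND":
--         return [not all(vals)]
--     if n == "NOR":
--         return [not any(vals)]
--     if n == "XNOR":
--         return [not (sum(1 for v in vals if v) % 2 == 1)]
--     # fallback : passthrough du premier input
--     return [vals[0] if vals else False]
-- ===== SOURCE B (Python) =====
-- def _gate_op(n):
--     # gate -> (binary operator, fold identity, invert-output flag)
--     if n == "AND":
--         return (lambda a, b: a and b), True, False
--     if n == "NAND":
--         return (lambda a, b: a and b), True, True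
--     if n == "OR":
--         return (lambda a, b: a or b), False, False
--     if n == "NOR":
--         return (lambda a, b: a or b), False, True
--     if n == "XOR":
--         return (lambda a, b: a != b), False, False
--     if n == "XNOR":
--         return (lambda a, b: a != b), False, True
--     return None
--
--
-- def gate_compute_outputs(name, inputs):
--     n = (name or "AND").strip().upper()
--     vals = [bool(v) for v in inputs]
--     if n == "NOT":
--         return [not vals[0]] if vals else [True]
--     spec = _gate_op(n)
--     if spec is None:
--         # fallback: passthrough of the first input
--         return [vals[0] if vals else False]
--     op, unit, invert = spec
--     acc = unit
--     for v in vals: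
--         acc = op(acc, v)
--     return [acc != invert]
-- ===== Notes on version B (the rewrite author's own statement) =====
-- stated objective: alternative
-- what changed: B interprets each gate as a monoid reduction: it maps the name to a (binary operator, identity, invert-output) triple and runs one generic fold over the inputs, instead of A's per-branch all()/any()/parity-count scans.
import Mathlib
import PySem

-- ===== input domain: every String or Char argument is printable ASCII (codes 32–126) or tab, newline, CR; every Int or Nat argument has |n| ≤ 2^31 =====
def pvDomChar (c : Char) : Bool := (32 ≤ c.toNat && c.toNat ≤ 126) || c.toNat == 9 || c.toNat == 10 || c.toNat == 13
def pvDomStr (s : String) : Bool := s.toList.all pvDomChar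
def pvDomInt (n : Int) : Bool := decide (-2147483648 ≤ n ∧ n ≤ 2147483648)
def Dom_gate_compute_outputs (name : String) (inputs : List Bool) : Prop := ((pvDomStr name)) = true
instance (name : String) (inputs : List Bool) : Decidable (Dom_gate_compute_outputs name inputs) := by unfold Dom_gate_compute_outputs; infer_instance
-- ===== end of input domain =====

-- B interprets each gate as a single generic fold with a gate-specific binary
-- operator, identity and invert-output flag, instead of A's per-branch
-- all()/any()/parity scans (objective: alternative).


-- ===== PORT A =====
def gate_compute_outputs (name : String) (inputs : List Bool) : List Bool :=
  let n := PySem.Str.upper (PySem.Str.strip (if name = "" then "AND" else name))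
  let vals := inputs
  if n = "AND" then [vals.all id]
  else if n = "OR" then [vals.any id]
  else if n = "NOT" then (match vals with | [] => [true] | v :: _ => [!v])
  else if n = "XOR" then [decide ((vals.foldl (fun a v => if v then a + 1 else a) 0) % 2 = 1)]
  else if n = "NAND" then [!vals.all id]
  else if n = "NOR" then [!vals.any id]
  else if n = "XNOR" then [!decide ((vals.foldl (fun a v => if v then a + 1 else a) 0) % 2 = 1)]
  else (match vals with | [] => [false] | v :: _ => [v])

-- ===== PORT B =====
-- gate -> (binary operator, fold identity, invert-output flag)
def pvGateOp (n : String) : Option ((Bool → Bool → Bool) × Bool × Bool) :=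
  if n = "AND" then some ((fun a b => a && b), true, false)
  else if n = "NAND" then some ((fun a b => a && b), true, true)
  else if n = "OR" then some ((fun a b => a || b), false, false)
  else if n = "NOR" then some ((fun a b => a || b), false, true)
  else if n = "XOR" then some ((fun a b => a != b), false, false)
  else if n = "XNOR" then some ((fun a b => a != b), false, true)
  else none

def gate_compute_outputs_alt (name : String) (inputs : List Bool) : List Bool :=
  let n := PySem.Str.upper (PySem.Str.strip (if name = "" then "AND" else name))
  let vals := inputs
  if n = "NOT" then (match vals with | [] => [true] | v :: _ => [!v])
  else
    match pvGateOp n with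
    | none => (match vals with | [] => [false] | v :: _ => [v])
    | some (op, unit, invert) => [(vals.foldl op unit) != invert]

-- ===== PRECONDITION & SPEC =====
def Spec_gate_compute_outputs (name : String) (inputs : List Bool) (out : List Bool) : Prop := out = gate_compute_outputs_alt name inputs
instance (name : String) (inputs : List Bool) (out : List Bool) : Decidable (Spec_gate_compute_outputs name inputs out) := by unfold Spec_gate_compute_outputs; infer_instance

-- ===== CLAIM (what is proved, stated in full; the proofs are below) =====
def Claim_equal_gate_compute_outputs : Prop := ∀ (name : String) (inputs : List Bool), Dom_gate_compute_outputs name inputs → Spec_gate_compute_outputs name inputs (gate_compute_outputs name inputs)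

-- ===== LEMMAS AND PROOFS =====
theorem pv_foldl_and (vals : List Bool) (a : Bool) :
    vals.foldl (fun a b => a && b) a = (a && vals.all id) := by
  induction vals generalizing a with
  | nil => simp
  | cons v vs ih => simp [ih, Bool.and_assoc]

theorem pv_foldl_or (vals : List Bool) (a : Bool) :
    vals.foldl (fun a b => a || b) a = (a || vals.any id) := by
  induction vals generalizing a with
  | nil => simp
  | cons v vs ih => simp [ih, Bool.or_assoc]

theorem pv_foldl_xor (vals : List Bool) (a : Bool) :
    vals.foldl (fun a b => a != b) a
      = (a != decide ((vals.foldl (fun a v => if v then a + 1 else a) (0:Nat)) % 2 = 1)) := by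
  have key : ∀ (vs : List Bool) (c : Nat),
      vs.foldl (fun a v => if v then a + 1 else a) c = c + vs.count true := by
    intro vs
    induction vs with
    | nil => simp
    | cons v rest ih => intro c; cases v <;> simp [ih] <;> omega
  induction vals generalizing a with
  | nil => simp
  | cons v vs ih =>
    simp only [List.foldl_cons, ih, key, List.count_cons]
    cases v <;> simp <;> rcases Nat.mod_two_eq_zero_or_one (vs.count true) with h | h <;>
      simp [Nat.add_mod, h]

-- ===== VERDICT (by name: the statement is the Claim_ definition above) =====
theorem gate_compute_outputs_spec : Claim_equal_gate_compute_outputs := by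
  intro name inputs _
  unfold Spec_gate_compute_outputs gate_compute_outputs gate_compute_outputs_alt pvGateOp
  generalize (PySem.Str.upper (PySem.Str.strip (if name = "" then "AND" else name))) = n
  by_cases h1 : n = "AND"
  · subst h1; simp [pv_foldl_and]
  by_cases h2 : n = "OR"
  · subst h2; simp [h1, pv_foldl_or]
  by_cases h3 : n = "NOT"
  · subst h3; simp [h1, h2]
  by_cases h4 : n = "XOR"
  · subst h4; simp [h1, h2, h3, pv_foldl_xor]
  by_cases h5 : n = "NAND"
  · subst h5; simp [h1, h2, h3, h4, pv_foldl_and]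
  by_cases h6 : n = "NOR"
  · subst h6; simp [h1, h2, h3, h4, h5, pv_foldl_or]
  by_cases h7 : n = "XNOR"
  · subst h7; simp [h1, h2, h3, h4, h5, h6, pv_foldl_xor]
  · simp [h1, h2, h3, h4, h5, h6, h7]
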